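-- pv_equiv track=rewrite | github.com/57BBBears/tasks | leetcode/medium/housebreaker.py | graph_max
-- ===== SOURCE A (Python) =====
-- def graph_max(graph: list[int], start: int) -> int:
--     sums = {i: 0 for i in range(len(graph))}
--     sums[start] = graph[start]
--     stack = [start]
--
--     forbidden = set()
--
--     while stack:
--         cur_i = stack[-1]
--
--         if cur_i in forbidden:
--             # backtrack
--             stack.pop()
--             forbidden.remove(cur_i)
--             # discard neighbors if it's not common ones with prev or next
--             if (cur_i - 2) not in forbidden:
--                 forbidden.discard(cur_i - 1)
--
--             if (cur_i + 2) not in forbidden: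
--                 forbidden.discard(cur_i + 1)
--
--             continue
--
--         forbidden |= {cur_i - 1, cur_i, cur_i + 1}
--
--         for move in sums:
--             if move not in forbidden:
--                 new_sum = sums[cur_i] + graph[move]
--                 if new_sum > sums[move]:
--                     sums[move] = new_sum
--                     stack.append(move)
--
--     return max(sums.values())
-- ===== SOURCE B (Python) =====
-- def graph_max(graph: list[int], start: int) -> int:
--     n = len(graph)
--     sums = [0] * n
--     sums[start] = graph[start]
--     forb = set()
--
--     def visit(c):
--         # expand c repeatedly until it is blocked, then do the backtrack adjustment
--         while c not in forb:
--             forb.update((c - 1, c, c + 1))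
--             base = sums[c]
--             kids = [m for m in range(n)
--                     if m not in forb and base + graph[m] > sums[m]]
--             for m in kids:
--                 sums[m] = base + graph[m]
--             for m in reversed(kids):
--                 visit(m)
--         forb.remove(c)
--         if (c - 2) not in forb:
--             forb.discard(c - 1)
--         if (c + 2) not in forb:
--             forb.discard(c + 1)
--
--     visit(start)
--     return max(sums)
-- ===== Notes on version B (the rewrite author's own statement) =====
-- stated objective: alternative
-- what changed: A's explicit while-loop stack machine (list used as a stack, dict-keyed sums, incremental push inside the relaxation fold) is replaced by a recursive depth-first visit with no stack at all: the backtrack branch becomes the post-recursion adjustment, re-expansion of a node becomes a while loop around the recursive calls, sums is a flat list, and the improving moves are computed as one batch filter followed by a batch update instead of an accumulating fold.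
-- outside the precondition, e.g. on graph_max([-1], -1): A returns 0, B returns -1; on graph_max([3, 4], 5): A raises IndexError, B raises IndexError
import Mathlib
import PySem

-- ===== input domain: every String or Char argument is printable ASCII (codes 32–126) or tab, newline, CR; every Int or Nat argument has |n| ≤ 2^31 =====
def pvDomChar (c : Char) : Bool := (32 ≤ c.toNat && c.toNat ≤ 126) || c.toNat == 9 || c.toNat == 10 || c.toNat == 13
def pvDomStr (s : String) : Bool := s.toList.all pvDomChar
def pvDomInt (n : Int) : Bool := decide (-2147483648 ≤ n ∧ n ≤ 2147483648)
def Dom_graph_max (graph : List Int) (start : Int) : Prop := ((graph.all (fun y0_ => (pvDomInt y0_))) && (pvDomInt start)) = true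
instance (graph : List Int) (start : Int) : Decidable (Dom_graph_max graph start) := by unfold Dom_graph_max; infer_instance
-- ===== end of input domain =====

-- B replaces A's explicit while-loop stack machine with a recursive depth-first visit
-- (no stack; the backtrack branch becomes the post-recursion adjustment), a flat list of
-- sums instead of a dict, and a batch filter + batch update for the relaxation step
-- instead of A's accumulating fold; same search, no speed claim.
-- Each port carries fuel 2^64 — a totality guard only (one unit per Python while-iteration
-- of A / per loop check of B's visit); the equivalence is proved for every fuel.

-- ===== PORT A =====
-- the while loop: state = (sums dict, stack with top at the end, forbidden set)
def graphMaxGo (graph : List Int) : Nat → PySem.Dict Int Int → List Int → PySem.Set Int → PySem.Dict Int Int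
  | 0, sums, _, _ => sums
  | f + 1, sums, stack, forb =>
    match stack.getLast? with       -- while stack: cur_i = stack[-1]
    | none => sums
    | some c =>
      if PySem.Set.contains forb c then
        -- backtrack: forbidden.remove(cur_i) — cur_i ∈ forbidden by the branch, so remove = discard
        let f1 := PySem.Set.discard forb c
        let f2 := if PySem.Set.contains f1 (c - 2) then f1 else PySem.Set.discard f1 (c - 1)
        let f3 := if PySem.Set.contains f2 (c + 2) then f2 else PySem.Set.discard f2 (c + 1)
        graphMaxGo graph f sums stack.dropLast f3
      else
        let forb' := PySem.Set.update forb [c - 1, c, c + 1]   -- forbidden |= {cur_i-1, cur_i, cur_i+1}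
        -- for move in sums: … (no key is ever added during the loop, so the key snapshot is exact)
        let r := (PySem.Dict.keys sums).foldl (fun (st : PySem.Dict Int Int × List Int) m =>
            if PySem.Set.contains forb' m then st
            else
              -- graph[move]: move is a key with 0 ≤ move < len(graph), so the 0-default is never used
              let ns := st.1.getD c 0 + PySem.List.pyGetD graph m 0
              if ns > st.1.getD m 0 then (st.1.insert m ns, st.2 ++ [m]) else st)
          (sums, stack)
        graphMaxGo graph f r.1 r.2 forb'

def graph_max (graph : List Int) (start : Int) : Int :=
  -- sums = {i: 0 for i in range(len(graph))}
  let sums0 := (PySem.List.pyRange 0 (graph.length : Int)).foldl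
      (fun (d : PySem.Dict Int Int) i => d.insert i 0) PySem.Dict.empty
  -- sums[start] = graph[start]  (in range under Pre_, where A does not raise)
  let sums1 := sums0.insert start (PySem.List.pyGetD graph start 0)
  let res := graphMaxGo graph (2 ^ 64) sums1 [start] PySem.Set.empty
  -- return max(sums.values())  (non-empty under Pre_)
  match PySem.List.max? (PySem.Dict.values res) (fun v => v) with
  | some v => v
  | none => 0

-- ===== PORT B =====
-- visit(c): Python mutates (sums, forb) and returns None; the port threads the state
-- (sums list, forbidden set) through and also returns the leftover fuel.
mutual
def visitB (graph : List Int) (f : Nat) (st : List Int × PySem.Set Int) (c : Int) :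
    Nat × (List Int × PySem.Set Int) :=
  match f, st with
  | 0, st => (0, st)
  | f + 1, (sums, forb) =>
    if PySem.Set.contains forb c then
      -- fell out of the while loop: backtrack adjustment (forb.remove(c) — c present, so = discard)
      let f1 := PySem.Set.discard forb c
      let f2 := if PySem.Set.contains f1 (c - 2) then f1 else PySem.Set.discard f1 (c - 1)
      let f3 := if PySem.Set.contains f2 (c + 2) then f2 else PySem.Set.discard f2 (c + 1)
      (f, (sums, f3))
    else
      -- one iteration of `while c not in forb`
      let forb' := PySem.Set.update forb [c - 1, c, c + 1]
      let base := PySem.List.pyGetD sums c 0          -- base = sums[c], in range under Pre_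
      let kids := (PySem.List.pyRange 0 (graph.length : Int)).filter
          (fun m => !(PySem.Set.contains forb' m) &&
            decide (base + PySem.List.pyGetD graph m 0 > PySem.List.pyGetD sums m 0))
      let sums' := kids.foldl (fun s m => PySem.List.pySetD s m (base + PySem.List.pyGetD graph m 0)) sums
      let r := visitKids graph f (sums', forb') kids.reverse
      -- loop again on c (the `min` only caps the leftover fuel; leftover ≤ given is proved below)
      visitB graph (min r.1 f) r.2 c
termination_by (f, 0)
decreasing_by
  · exact Prod.Lex.left _ _ (Nat.lt_succ_self f)
  · exact Prod.Lex.left _ _ (Nat.lt_succ_of_le (Nat.min_le_right _ _))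
def visitKids (graph : List Int) (f : Nat) (st : List Int × PySem.Set Int) (ks : List Int) :
    Nat × (List Int × PySem.Set Int) :=
  match ks with
  | [] => (f, st)
  | k :: ks' =>
    let r := visitB graph f st k
    visitKids graph (min r.1 f) r.2 ks'
termination_by (f, ks.length + 1)
decreasing_by
  · exact Prod.Lex.right f (Nat.zero_lt_succ _)
  · rcases Nat.lt_or_eq_of_le (Nat.min_le_right _ f) with h | h
    · exact Prod.Lex.left _ _ h
    · rw [h]; exact Prod.Lex.right f (Nat.lt_succ_self _)
end

def graph_max_alt (graph : List Int) (start : Int) : Int :=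
  -- sums = [0] * n;  sums[start] = graph[start]  (0 ≤ start < n under Pre_, where Python does not raise)
  let sums0 := PySem.List.pySetD (List.replicate graph.length (0 : Int)) start
      (PySem.List.pyGetD graph start 0)
  let r := visitB graph (2 ^ 64) (sums0, PySem.Set.empty) start   -- visit(start)
  match PySem.List.max? r.2.1 (fun v => v) with                    -- return max(sums)
  | some v => v
  | none => 0

-- ===== PRECONDITION & SPEC =====
-- Pre_ excludes start outside 0 ≤ start < len(graph): for -len ≤ start < 0 A returns, but its
-- value is an accident of keying the sums dict by the raw negative index (a fresh negative key
-- appears beside the positional one and is explored as a phantom node), while B's list write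
-- aliases the positional index — a corner no caller would specify; for every other excluded
-- start (and the empty graph) A raises IndexError.
def Pre_graph_max (graph : List Int) (start : Int) : Prop :=
  0 ≤ start ∧ start < (graph.length : Int)
instance (graph : List Int) (start : Int) : Decidable (Pre_graph_max graph start) := by
  unfold Pre_graph_max; infer_instance

def pvWitness_graph_max : List Int × Int := ([1, -2, 3], 0)

def Spec_graph_max (graph : List Int) (start : Int) (out : Int) : Prop :=
  out = graph_max_alt graph start
instance (graph : List Int) (start : Int) (out : Int) : Decidable (Spec_graph_max graph start out) := by
  unfold Spec_graph_max; infer_instance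

-- ===== CLAIM (what is proved, stated in full; the proofs are below) =====
def Claim_equal_graph_max : Prop := ∀ (graph : List Int) (start : Int), Dom_graph_max graph start → Pre_graph_max graph start → Spec_graph_max graph start (graph_max graph start)

-- ===== LEMMAS AND PROOFS =====

-- leftover fuel never exceeds the fuel given (so the `min` caps in the ports are inert)
theorem fuel_le (graph : List Int) :
    ∀ f : Nat, (∀ st c, (visitB graph f st c).1 ≤ f) ∧
      (∀ ks st, (visitKids graph f st ks).1 ≤ f) := by
  intro f
  induction f using Nat.strong_induction_on with
  | _ f IH =>
    have hB : ∀ st c, (visitB graph f st c).1 ≤ f := by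
      intro st c
      match f, st with
      | 0, st => simp [visitB]
      | f + 1, (sums, forb) =>
        rw [visitB]
        by_cases h : forb.contains c = true
        · rw [if_pos h]
          exact Nat.le_succ f
        · rw [if_neg h]
          exact le_trans (le_trans
            ((IH _ (Nat.lt_succ_of_le (Nat.min_le_right _ _))).1 _ _)
            (Nat.min_le_right _ f)) (Nat.le_succ f)
    refine ⟨hB, ?_⟩
    intro ks
    induction ks with
    | nil => intro st; simp [visitKids]
    | cons k ks' ihk =>
      intro st
      rw [visitKids]
      have h1 : (visitB graph f st k).1 ≤ f := hB st k
      rcases Nat.lt_or_eq_of_le (Nat.min_le_right (visitB graph f st k).1 f) with h | h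
      · calc (visitKids graph (min _ f) _ ks').1 ≤ min _ f := (IH _ h).2 _ _
          _ ≤ f := Nat.min_le_right _ _
      · rw [h]; exact ihk _

theorem visitB_fuel_le (graph : List Int) (f : Nat) (st : List Int × PySem.Set Int) (c : Int) :
    (visitB graph f st c).1 ≤ f := (fuel_le graph f).1 st c

theorem visitKids_fuel_le (graph : List Int) (f : Nat) (st : List Int × PySem.Set Int)
    (ks : List Int) : (visitKids graph f st ks).1 ≤ f := (fuel_le graph f).2 ks st

theorem visitKids_append (graph : List Int) :
    ∀ (L1 L2 : List Int) (f : Nat) (st : List Int × PySem.Set Int),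
      visitKids graph f st (L1 ++ L2) =
        visitKids graph (visitKids graph f st L1).1 (visitKids graph f st L1).2 L2 := by
  intro L1
  induction L1 with
  | nil => intro L2 f st; simp [visitKids]
  | cons k ks ih =>
    intro L2 f st
    rw [List.cons_append, visitKids, visitKids, ih]

theorem visitKids_zero (graph : List Int) :
    ∀ (ks : List Int) (st : List Int × PySem.Set Int), visitKids graph 0 st ks = (0, st) := by
  intro ks
  induction ks with
  | nil => intro st; simp [visitKids]
  | cons k ks' ih => intro st; rw [visitKids]; simp [visitB, ih]

-- `dictOf xs` is the dict {0: xs[0], 1: xs[1], …} A's machine carries where B carries the list xs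
def dictOf (xs : List Int) : PySem.Dict Int Int :=
  PySem.Dict.mk ((PySem.List.pyRange 0 (xs.length : Int)).zip xs)

theorem pyRange_len (a b : Int) :
    (PySem.List.pyRange a b).length = (b - a).toNat := by
  simp [PySem.List.pyRange]; omega

theorem zip_replicate_pairs (l : List Int) (c : Int) :
    l.zip (List.replicate l.length c) = l.map (fun k => (k, c)) := by
  induction l with
  | nil => rfl
  | cons x t ih => simp [List.replicate_succ, ih]

theorem keys_dictOf (xs : List Int) :
    (dictOf xs).keys = PySem.List.pyRange 0 (xs.length : Int) := by
  unfold dictOf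
  rw [PySem.Dict.keys_mk]
  exact List.map_fst_zip (by rw [pyRange_len]; omega)

theorem values_dictOf (xs : List Int) : (dictOf xs).values = xs := by
  unfold dictOf
  rw [show (PySem.Dict.mk ((PySem.List.pyRange 0 (xs.length : Int)).zip xs)).values
      = List.map Prod.snd ((PySem.List.pyRange 0 (xs.length : Int)).zip xs) from rfl]
  exact List.map_snd_zip (by rw [pyRange_len]; omega)

theorem contains_dictOf (xs : List Int) (i : Int) (h0 : 0 ≤ i) (h1 : i < (xs.length : Int)) :
    (dictOf xs).contains i = true := by
  rw [PySem.Dict.contains_iff_mem_keys, keys_dictOf, PySem.List.mem_pyRange_one]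
  exact ⟨h0, h1⟩

theorem get?_mk_zip (xs : List Int) : ∀ (a i : Int), a ≤ i → i < a + (xs.length : Int) →
    (PySem.Dict.mk ((PySem.List.pyRange a (a + (xs.length : Int))).zip xs)).get? i
      = some (xs.getD (i - a).toNat 0) := by
  induction xs with
  | nil => intro a i h0 h1; simp at h1; omega
  | cons x t ih =>
    intro a i h0 h1
    have hab : a < a + ((x :: t).length : Int) := by simp
    rw [PySem.List.pyRange_one_cons hab]
    simp only [List.zip_cons_cons, PySem.Dict.get?_mk_cons]
    by_cases hai : a = i
    · simp [hai]
    · have hne : (a == i) = false := by simpa using hai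
      rw [hne]
      simp only [Bool.false_eq_true, if_false]
      have harr : a + ((x :: t).length : Int) = (a + 1) + (t.length : Int) := by
        simp only [List.length_cons]
        push_cast
        omega
      rw [harr]
      rw [ih (a+1) i (by omega) (by simp at h1 ⊢; omega)]
      congr 1
      have : (i - a).toNat = (i - (a+1)).toNat + 1 := by omega
      simp [this]

theorem getD_dictOf (xs : List Int) (i : Int) (h0 : 0 ≤ i) (h1 : i < (xs.length : Int)) :
    (dictOf xs).getD i 0 = PySem.List.pyGetD xs i 0 := by
  unfold dictOf
  rw [PySem.Dict.getD_eq_get?_getD]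
  have := get?_mk_zip xs 0 i h0 (by omega)
  rw [show (0:Int) + (xs.length : Int) = (xs.length : Int) by omega] at this
  rw [this]
  rw [PySem.List.pyGetD_eq_getElem xs 0 h0 h1]
  have h00 : (i - 0).toNat = i.toNat := by omega
  rw [h00, List.getD_eq_getElem?_getD,
    List.getElem?_eq_getElem (by omega : i.toNat < xs.length)]
  rfl

theorem map_replace_skip (l : List (Int × Int)) (i v : Int)
    (h : ∀ p ∈ l, p.1 ≠ i) :
    l.map (fun p => if p.1 == i then (i, v) else p) = l := by
  induction l with
  | nil => rfl
  | cons p t ih =>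
    have hp : p.1 ≠ i := h p (by simp)
    simp only [List.map_cons, List.cons.injEq]
    refine ⟨by simp [hp], ih (fun q hq => h q (by simp [hq]))⟩

theorem zip_map_replace (xs : List Int) : ∀ (a i v : Int), a ≤ i → i < a + (xs.length : Int) →
    ((PySem.List.pyRange a (a + (xs.length : Int))).zip xs).map
        (fun p => if p.1 == i then (i, v) else p)
      = (PySem.List.pyRange a (a + (xs.length : Int))).zip (xs.set (i - a).toNat v) := by
  induction xs with
  | nil => intro a i v h0 h1; simp at h1; omega
  | cons x t ih =>
    intro a i v h0 h1
    have hab : a < a + ((x :: t).length : Int) := by simp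
    rw [PySem.List.pyRange_one_cons hab]
    have harr : a + ((x :: t).length : Int) = (a + 1) + (t.length : Int) := by
      simp only [List.length_cons]; push_cast; omega
    by_cases hai : a = i
    · subst hai
      have h00 : (a - a).toNat = 0 := by omega
      simp only [h00, List.set_cons_zero, List.zip_cons_cons, List.map_cons, beq_self_eq_true,
        if_true]
      congr 1
      apply map_replace_skip
      intro p hp
      have h1' : p.1 ∈ PySem.List.pyRange (a+1) (a + ((x :: t).length : Int)) :=
        List.of_mem_zip hp |>.1
      have := PySem.List.mem_pyRange_one.mp h1'
      omega
    · have hne : (a == i) = false := by simpa using hai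
      have hstep : (i - a).toNat = (i - (a+1)).toNat + 1 := by omega
      simp only [List.zip_cons_cons, List.map_cons, hne, Bool.false_eq_true, if_false,
        hstep, List.set_cons_succ]
      congr 1
      rw [harr]
      exact ih (a+1) i v (by omega) (by simp only [List.length_cons] at h1; push_cast at h1 ⊢; omega)

theorem insert_dictOf (xs : List Int) (i : Int) (v : Int) (h0 : 0 ≤ i)
    (h1 : i < (xs.length : Int)) :
    (dictOf xs).insert i v = dictOf (xs.set i.toNat v) := by
  have hc : (dictOf xs).contains i = true := contains_dictOf xs i h0 h1
  have hitems := PySem.Dict.items_insert_of_contains (dictOf xs) v hc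
  have hit : (dictOf xs).items = (PySem.List.pyRange 0 (xs.length : Int)).zip xs := rfl
  rw [hit] at hitems
  have hz := zip_map_replace xs 0 i v h0 (by omega)
  rw [show (0:Int) + (xs.length : Int) = (xs.length : Int) by omega] at hz
  have h00 : (i - 0).toNat = i.toNat := by omega
  rw [h00] at hz
  rw [hz] at hitems
  have heta : (dictOf xs).insert i v = PySem.Dict.mk (((dictOf xs).insert i v).items) := rfl
  rw [heta, hitems]
  unfold dictOf
  have hl : (xs.set i.toNat v).length = xs.length := by simp
  rw [hl]

theorem pyGetD_pySetD_ne (xs : List Int) (m m' v : Int) (hm0 : 0 ≤ m) (h0 : 0 ≤ m')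
    (h1 : m' < (xs.length : Int)) (hne : m ≠ m') :
    PySem.List.pyGetD (PySem.List.pySetD xs m v) m' 0 = PySem.List.pyGetD xs m' 0 := by
  rw [PySem.List.pySetD_of_nonneg _ _ hm0]
  rw [PySem.List.pyGetD_eq_getElem xs 0 h0 h1,
    PySem.List.pyGetD_eq_getElem _ 0 h0 (by simpa using h1)]
  rw [List.getElem_set]
  simp only [ite_eq_right_iff]
  intro he
  exfalso
  omega

theorem length_foldl_pySetD (ks : List Int) (g : Int → Int) :
    ∀ xs : List Int, (ks.foldl (fun s m => PySem.List.pySetD s m (g m)) xs).length = xs.length := by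
  induction ks with
  | nil => intro xs; rfl
  | cons k ks' ih =>
    intro xs
    rw [List.foldl_cons, ih]
    simp [PySem.List.length_pySetD]

-- A's relaxation fold over the keys equals B's batch filter + batch update:
-- each condition reads only sums[c] (never written: c is forbidden) and sums[m] at m's own
-- single iteration, so the batch evaluation over the entry state xs0 agrees.
theorem fold_batch (graph : List Int) (c : Int) (forb' : PySem.Set Int)
    (hc0 : 0 ≤ c) (hcf : PySem.Set.contains forb' c = true) (base : Int) :
    ∀ (ms : List Int) (xs xs0 : List Int) (tb : List Int),
      ms.Nodup →
      c < (xs.length : Int) →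
      xs.length = xs0.length →
      (∀ m ∈ ms, 0 ≤ m ∧ m < (xs.length : Int)) →
      (∀ m ∈ ms, PySem.List.pyGetD xs m 0 = PySem.List.pyGetD xs0 m 0) →
      PySem.List.pyGetD xs c 0 = base →
      (ms.foldl (fun (st : PySem.Dict Int Int × List Int) m =>
          if PySem.Set.contains forb' m then st
          else
            let ns := st.1.getD c 0 + PySem.List.pyGetD graph m 0
            if ns > st.1.getD m 0 then (st.1.insert m ns, st.2 ++ [m]) else st)
        (dictOf xs, tb))
      = (dictOf ((ms.filter (fun m => !(PySem.Set.contains forb' m) &&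
            decide (base + PySem.List.pyGetD graph m 0 > PySem.List.pyGetD xs0 m 0))).foldl
            (fun s m => PySem.List.pySetD s m (base + PySem.List.pyGetD graph m 0)) xs),
          tb ++ ms.filter (fun m => !(PySem.Set.contains forb' m) &&
            decide (base + PySem.List.pyGetD graph m 0 > PySem.List.pyGetD xs0 m 0))) := by
  intro ms
  induction ms with
  | nil => intro xs xs0 tb _ _ _ _ _ _; simp
  | cons m rest ih =>
    intro xs xs0 tb hnd hc hlen hmem hagree hbase
    have hmr := hmem m (by simp)
    have hnd' : rest.Nodup := (List.nodup_cons.mp hnd).2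
    have hmnotin : m ∉ rest := (List.nodup_cons.mp hnd).1
    rw [List.foldl_cons, List.filter_cons]
    by_cases hf : PySem.Set.contains forb' m = true
    · -- forbidden: both skip
      simp only [hf, if_true, Bool.not_true, Bool.false_and]
      rw [if_neg (by simp)]
      exact ih xs xs0 tb hnd' hc hlen (fun x hx => hmem x (by simp [hx]))
        (fun x hx => hagree x (by simp [hx])) hbase
    · have hf' : PySem.Set.contains forb' m = false := by
        rcases Bool.eq_false_or_eq_true (PySem.Set.contains forb' m) with h | h
        · exact absurd h hf
        · exact h
      have hmc : m ≠ c := by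
        intro he; rw [he, hcf] at hf'; cases hf'
      have hgc : (dictOf xs).getD c 0 = base := by
        rw [getD_dictOf xs c hc0 hc]; exact hbase
      have hgm : (dictOf xs).getD m 0 = PySem.List.pyGetD xs0 m 0 := by
        rw [getD_dictOf xs m hmr.1 hmr.2]; exact hagree m (by simp)
      simp only [hf', Bool.false_eq_true, if_false, Bool.not_false, Bool.true_and]
      by_cases hcond : base + PySem.List.pyGetD graph m 0 > PySem.List.pyGetD xs0 m 0
      · rw [if_pos (by rw [hgc, hgm]; exact hcond)]
        rw [if_pos (by simpa using hcond)]
        have hins : (dictOf xs).insert m ((dictOf xs).getD c 0 + PySem.List.pyGetD graph m 0)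
            = dictOf (PySem.List.pySetD xs m (base + PySem.List.pyGetD graph m 0)) := by
          rw [hgc, PySem.List.pySetD_of_nonneg _ _ hmr.1]
          exact insert_dictOf xs m _ hmr.1 hmr.2
        rw [hins]
        have hlen' : (PySem.List.pySetD xs m (base + PySem.List.pyGetD graph m 0)).length = xs.length := by
          simp [PySem.List.length_pySetD]
        rw [ih (PySem.List.pySetD xs m (base + PySem.List.pyGetD graph m 0)) xs0 (tb ++ [m])
          hnd' (by rw [hlen']; exact hc) (by rw [hlen']; exact hlen)
          (fun x hx => by rw [hlen']; exact hmem x (by simp [hx]))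
          (fun x hx => by
            rw [pyGetD_pySetD_ne xs m x _ hmr.1 (hmem x (by simp [hx])).1
              (hmem x (by simp [hx])).2 (fun he => hmnotin (he ▸ hx))]
            exact hagree x (by simp [hx]))
          (by rw [pyGetD_pySetD_ne xs m c _ hmr.1 hc0 hc hmc]; exact hbase)]
        rw [List.foldl_cons, List.append_assoc]
        rfl
      · rw [if_neg (by rw [hgc, hgm]; exact hcond)]
        rw [if_neg (by simpa using hcond)]
        exact ih xs xs0 tb hnd' hc hlen (fun x hx => hmem x (by simp [hx]))
          (fun x hx => hagree x (by simp [hx])) hbase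

-- lockstep simulation: A's machine on stack K.reverse (top at the end) at fuel f equals
-- B's recursive visits of the continuation K (top first) at the same fuel
theorem machine_sim (graph : List Int) :
    ∀ (f : Nat) (K : List Int) (xs : List Int) (forb : PySem.Set Int),
      xs.length = graph.length →
      (∀ m ∈ K, 0 ≤ m ∧ m < (graph.length : Int)) →
      graphMaxGo graph f (dictOf xs) K.reverse forb
        = dictOf (visitKids graph f (xs, forb) K).2.1 := by
  intro f
  induction f with
  | zero =>
    intro K xs forb _ _
    rw [visitKids_zero, graphMaxGo]
  | succ f ih =>
    intro K xs forb hlen hK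
    cases K with
    | nil =>
      simp only [List.reverse_nil, graphMaxGo, List.getLast?_nil, visitKids]
    | cons c ks =>
      have hcr := hK c (by simp)
      have hlast : (c :: ks).reverse.getLast? = some c := by
        rw [List.getLast?_reverse]; rfl
      rw [graphMaxGo]
      rw [hlast]
      simp only []
      rw [visitKids, visitB]
      by_cases hcf : PySem.Set.contains forb c = true
      · -- backtrack: both adjust the set the same way and continue at fuel f
        simp only [hcf, if_true]
        have hdrop : (c :: ks).reverse.dropLast = ks.reverse := by
          rw [List.reverse_cons]; exact List.dropLast_concat
        rw [hdrop]
        rw [show (min f (f + 1)) = f from Nat.min_eq_left (Nat.le_succ f)]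
        exact ih ks xs _ hlen (fun x hx => hK x (by simp [hx]))
      · have hcf' : PySem.Set.contains forb c = false := by
          rcases Bool.eq_false_or_eq_true (PySem.Set.contains forb c) with h | h
          · exact absurd h hcf
          · exact h
        simp only [hcf', Bool.false_eq_true, if_false]
        -- names for B's expand step
        set forb' := PySem.Set.update forb [c - 1, c, c + 1] with hforb'
        set base := PySem.List.pyGetD xs c 0 with hbase
        set kids := (PySem.List.pyRange 0 (graph.length : Int)).filter
          (fun m => !(PySem.Set.contains forb' m) &&
            decide (base + PySem.List.pyGetD graph m 0 > PySem.List.pyGetD xs m 0)) with hkids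
        set sums' := kids.foldl (fun s m => PySem.List.pySetD s m (base + PySem.List.pyGetD graph m 0)) xs
          with hsums'
        have hcin : PySem.Set.contains forb' c = true := by
          rw [hforb']
          rw [(PySem.Set.contains_iff _ _).mpr ?_]
          rw [PySem.Set.mem_update]
          right; simp
        -- A's inner fold = B's batch
        have hfold := fold_batch graph c forb' hcr.1 hcin base
          (PySem.List.pyRange 0 (graph.length : Int)) xs xs ((c :: ks).reverse)
          (by
            rw [PySem.List.pyRange_zero_natCast]
            exact (List.nodup_range).map (fun a b h => by exact_mod_cast h))
          (by rw [hlen]; exact hcr.2) rfl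
          (fun m hm => by
            have := PySem.List.mem_pyRange_one.mp hm
            rw [hlen]
            exact ⟨this.1, by omega⟩)
          (fun m _ => rfl) rfl
        have hkeys : (PySem.Dict.keys (dictOf xs)) = PySem.List.pyRange 0 (graph.length : Int) := by
          rw [keys_dictOf, hlen]
        rw [hkeys, hfold]
        -- A's new stack is the reverse of B's new continuation
        have hstack : (c :: ks).reverse ++ kids = (kids.reverse ++ c :: ks).reverse := by
          simp
        rw [hstack]
        -- B's side: unfold the recursive-call chain into visitKids over the new continuation
        have hk1 : (visitKids graph f (sums', forb') kids.reverse).1 ≤ f :=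
          visitKids_fuel_le graph f _ _
        have hmin1 : min (visitKids graph f (sums', forb') kids.reverse).1 f
            = (visitKids graph f (sums', forb') kids.reverse).1 := Nat.min_eq_left hk1
        have hb1 : (visitB graph (visitKids graph f (sums', forb') kids.reverse).1
            (visitKids graph f (sums', forb') kids.reverse).2 c).1 ≤ f :=
          le_trans (visitB_fuel_le graph _ _ _) hk1
        have hb2 : (visitB graph (visitKids graph f (sums', forb') kids.reverse).1
            (visitKids graph f (sums', forb') kids.reverse).2 c).1 ≤ f + 1 :=
          le_trans hb1 (Nat.le_succ f)
        rw [hmin1, Nat.min_eq_left hb2]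
        have hrhs : visitKids graph f (sums', forb') (kids.reverse ++ c :: ks)
            = visitKids graph
                (visitB graph (visitKids graph f (sums', forb') kids.reverse).1
                  (visitKids graph f (sums', forb') kids.reverse).2 c).1
                (visitB graph (visitKids graph f (sums', forb') kids.reverse).1
                  (visitKids graph f (sums', forb') kids.reverse).2 c).2 ks := by
          rw [visitKids_append, visitKids]
          rw [Nat.min_eq_left (visitB_fuel_le graph _ _ _)]
        rw [← hrhs]
        -- invariants for the new continuation
        exact ih (kids.reverse ++ c :: ks) sums' forb'
          (by rw [hsums', length_foldl_pySetD]; exact hlen)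
          (by
            intro x hx
            rcases List.mem_append.mp hx with hx | hx
            · have hx' := List.mem_reverse.mp hx
              rw [hkids] at hx'
              have := PySem.List.mem_pyRange_one.mp (List.mem_of_mem_filter hx')
              exact this
            · rcases List.mem_cons.mp hx with hx | hx
              · rw [hx]; exact hcr
              · exact hK x (by simp [hx]))

-- the two initial sums are the same structure: A's dict build + insert = dict of B's list
theorem init_sums (graph : List Int) (start : Int) (h0 : 0 ≤ start)
    (h1 : start < (graph.length : Int)) :
    ((PySem.List.pyRange 0 (graph.length : Int)).foldl
        (fun (d : PySem.Dict Int Int) i => d.insert i 0) PySem.Dict.empty).insert start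
        (PySem.List.pyGetD graph start 0) =
      dictOf (PySem.List.pySetD (List.replicate graph.length (0 : Int)) start
        (PySem.List.pyGetD graph start 0)) := by
  have hnodup : (PySem.List.pyRange 0 (graph.length : Int)).Nodup := by
    rw [PySem.List.pyRange_zero_natCast]
    exact (List.nodup_range).map (fun a b h => by exact_mod_cast h)
  have hitems := PySem.Dict.items_foldl_insert_fresh
    (PySem.List.pyRange 0 (graph.length : Int)) (fun i => i) (fun _ => (0:Int))
    PySem.Dict.empty (fun a _ => PySem.Dict.contains_empty a)
    (by simpa using hnodup)
  have heta : ((PySem.List.pyRange 0 (graph.length : Int)).foldl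
      (fun (d : PySem.Dict Int Int) i => d.insert i 0) PySem.Dict.empty)
      = PySem.Dict.mk (((PySem.List.pyRange 0 (graph.length : Int)).foldl
        (fun (d : PySem.Dict Int Int) i => d.insert i 0) PySem.Dict.empty).items) := rfl
  have hfold : ((PySem.List.pyRange 0 (graph.length : Int)).foldl
      (fun (d : PySem.Dict Int Int) i => d.insert i 0) PySem.Dict.empty)
      = dictOf (List.replicate graph.length (0:Int)) := by
    rw [heta, hitems]
    unfold dictOf
    have hlr : ((List.replicate graph.length (0:Int)).length : Int) = (graph.length : Int) := by
      simp
    rw [hlr]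
    have hzip : (PySem.List.pyRange 0 (graph.length : Int)).zip
        (List.replicate graph.length (0:Int))
        = (PySem.List.pyRange 0 (graph.length : Int)).map (fun k => (k, (0:Int))) := by
      have hlen : (PySem.List.pyRange 0 (graph.length : Int)).length = graph.length := by
        rw [pyRange_len]; omega
      rw [show (List.replicate graph.length (0:Int))
          = List.replicate (PySem.List.pyRange 0 (graph.length : Int)).length (0:Int) by rw [hlen]]
      exact zip_replicate_pairs _ 0
    rw [hzip]
    simp [PySem.Dict.empty]
  rw [hfold]
  rw [insert_dictOf _ start _ h0 (by simpa using h1)]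
  rw [PySem.List.pySetD_of_nonneg _ _ h0]

-- ===== VERDICT (by name: the statement is the Claim_ definition above) =====
theorem graph_max_spec : Claim_equal_graph_max := by
  unfold Claim_equal_graph_max
  intro graph start _ hpre
  unfold Spec_graph_max Pre_graph_max at *
  obtain ⟨h0, h1⟩ := hpre
  unfold graph_max graph_max_alt
  simp only []
  rw [init_sums graph start h0 h1]
  have hms := machine_sim graph (2 ^ 64) [start]
    (PySem.List.pySetD (List.replicate graph.length (0 : Int)) start (PySem.List.pyGetD graph start 0))
    PySem.Set.empty
    (by simp [PySem.List.length_pySetD])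
    (by intro x hx; simp at hx; subst hx; exact ⟨h0, h1⟩)
  rw [List.reverse_singleton] at hms
  rw [hms, values_dictOf]
  -- visitKids on the single-element continuation is visitB on start
  rw [visitKids, visitKids]
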